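-- pv_equiv track=rewrite | github.com/yasha1971-coder/glyph-engine | tools/chunk_missed_df_diagnostic_v1.py | build_rare_df_map
-- ===== SOURCE A (Python) =====
-- def build_rare_df_map(filter_obj):
--     rare_df = {}
--     for row in filter_obj["rare"]["chunks"]:
--         for sig_hex, _cnt, df in row["rare_anchors"]:
--             old = rare_df.get(sig_hex)
--             if old is None or df < old:
--                 rare_df[sig_hex] = df
--     return rare_df
-- ===== SOURCE B (Python) =====
-- def build_rare_df_map(filter_obj):
--     # flatten -> dedup-keys -> per-key reduce, instead of A's streaming dict min-update
--     pairs = [(sig_hex, df)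
--              for row in filter_obj["rare"]["chunks"]
--              for sig_hex, _cnt, df in row["rare_anchors"]]
--     order = list(dict.fromkeys(sig for sig, _ in pairs))
--     return {sig: min(df for s, df in pairs if s == sig) for sig in order}
-- ===== Notes on version B (the rewrite author's own statement) =====
-- stated objective: alternative
-- what changed: Replaced A's single streaming nested-loop dict running-minimum with a three-stage pipeline: flatten all (sig, df) pairs into one list, deduplicate the signatures in first-occurrence order, then compute each signature's minimum by scanning the flat pair list per key.
import Mathlib
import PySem

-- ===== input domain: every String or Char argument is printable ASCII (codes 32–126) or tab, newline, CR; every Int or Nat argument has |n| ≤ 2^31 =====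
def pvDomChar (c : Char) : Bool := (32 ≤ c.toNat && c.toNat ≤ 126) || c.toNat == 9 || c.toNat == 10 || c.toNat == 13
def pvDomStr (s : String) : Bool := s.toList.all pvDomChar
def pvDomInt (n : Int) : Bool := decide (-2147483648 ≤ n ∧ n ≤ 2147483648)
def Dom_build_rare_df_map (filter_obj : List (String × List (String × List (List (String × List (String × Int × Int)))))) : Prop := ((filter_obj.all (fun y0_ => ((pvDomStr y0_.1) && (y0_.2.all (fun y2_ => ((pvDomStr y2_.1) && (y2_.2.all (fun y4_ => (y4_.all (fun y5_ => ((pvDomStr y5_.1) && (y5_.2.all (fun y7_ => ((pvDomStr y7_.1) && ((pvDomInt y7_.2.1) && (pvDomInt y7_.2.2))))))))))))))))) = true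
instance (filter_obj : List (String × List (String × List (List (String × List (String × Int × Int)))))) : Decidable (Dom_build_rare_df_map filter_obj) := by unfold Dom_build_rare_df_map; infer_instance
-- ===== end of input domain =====

-- B replaces A's streaming dict running-minimum with a flatten → dedup-keys → per-key-minimum pipeline (objective: alternative decomposition, same result).

-- ===== PORT A =====
def build_rare_df_map (filter_obj : List (String × List (String × List (List (String × List (String × Int × Int)))))) : List (String × Int) :=
  ((((PySem.Dict.mk ((PySem.Dict.mk filter_obj).getD "rare" [])).getD "chunks" []).foldl
    (fun d row =>
      ((PySem.Dict.mk row).getD "rare_anchors" []).foldl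
        (fun d t =>
          match d.get? t.1 with
          | none => d.insert t.1 t.2.2
          | some old => if t.2.2 < old then d.insert t.1 t.2.2 else d) d)
    PySem.Dict.empty).items)

-- ===== PORT B =====
-- the 'match … | [] => 0' branch only makes the `min` of a comprehension total; every key
-- listed in `order` has at least one matching pair, so it is never taken.
def build_rare_df_map_alt (filter_obj : List (String × List (String × List (List (String × List (String × Int × Int)))))) : List (String × Int) :=
  let pairs : List (String × Int) :=
    (((PySem.Dict.mk ((PySem.Dict.mk filter_obj).getD "rare" [])).getD "chunks" []).flatMap
      (fun row => ((PySem.Dict.mk row).getD "rare_anchors" []).map (fun t => (t.1, t.2.2))))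
  let order : List String := PySem.Set.ofList (pairs.map Prod.fst)
  order.map (fun sig =>
    (sig,
      match (pairs.filter (fun p => p.1 == sig)).map Prod.snd with
      | [] => 0
      | x :: t => t.foldl min x))

-- ===== PRECONDITION & SPEC =====
-- Pre_ excludes exactly the inputs on which Python A raises KeyError: a missing "rare" key,
-- a missing "chunks" key inside it, or a row without "rare_anchors".
def Pre_build_rare_df_map (filter_obj : List (String × List (String × List (List (String × List (String × Int × Int)))))) : Prop :=
  ((PySem.Dict.mk filter_obj).get? "rare").isSome = true ∧
  ((PySem.Dict.mk ((PySem.Dict.mk filter_obj).getD "rare" [])).get? "chunks").isSome = true ∧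
  ∀ row ∈ (PySem.Dict.mk ((PySem.Dict.mk filter_obj).getD "rare" [])).getD "chunks" [],
    ((PySem.Dict.mk row).get? "rare_anchors").isSome = true
instance (filter_obj : List (String × List (String × List (List (String × List (String × Int × Int)))))) : Decidable (Pre_build_rare_df_map filter_obj) := by unfold Pre_build_rare_df_map; infer_instance

def pvWitness_build_rare_df_map : (List (String × List (String × List (List (String × List (String × Int × Int)))))) :=
  [("rare", [("chunks", [[("rare_anchors", [("ab", 2, 7), ("cd", 1, 3), ("ab", 1, 5)])]])])]

def Spec_build_rare_df_map (filter_obj : List (String × List (String × List (List (String × List (String × Int × Int)))))) (out : List (String × Int)) : Prop := out = build_rare_df_map_alt filter_obj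
instance (filter_obj : List (String × List (String × List (List (String × List (String × Int × Int)))))) (out : List (String × Int)) : Decidable (Spec_build_rare_df_map filter_obj out) := by unfold Spec_build_rare_df_map; infer_instance

-- ===== CLAIM (what is proved, stated in full; the proofs are below) =====
def Claim_equal_build_rare_df_map : Prop := ∀ (filter_obj : List (String × List (String × List (List (String × List (String × Int × Int)))))), Dom_build_rare_df_map filter_obj → Pre_build_rare_df_map filter_obj → Spec_build_rare_df_map filter_obj (build_rare_df_map filter_obj)

-- ===== LEMMAS AND PROOFS =====

-- A's inner update step, on (sig, df) pairs
def pvStepA (d : PySem.Dict String Int) (p : String × Int) : PySem.Dict String Int :=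
  match d.get? p.1 with
  | none => d.insert p.1 p.2
  | some old => if p.2 < old then d.insert p.1 p.2 else d

-- running minimum with an Option accumulator ('old is None or df < old')
def pvOMin (o : Option Int) (v : Int) : Option Int :=
  match o with
  | none => some v
  | some w => some (if v < w then v else w)

lemma pv_foldl_foldl {α β γ : Type} (g : β → List α) (f : γ → α → γ) :
    ∀ (l : List β) (d : γ), l.foldl (fun d row => (g row).foldl f d) d = (l.flatMap g).foldl f d := by
  intro l
  induction l with
  | nil => intro d; simp
  | cons x xs ih => intro d; simp [List.foldl_append, ih]

lemma pvStepA_get? (d : PySem.Dict String Int) (p : String × Int) (k : String) :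
    (pvStepA d p).get? k = if p.1 = k then pvOMin (d.get? p.1) p.2 else d.get? k := by
  unfold pvStepA pvOMin
  cases h : d.get? p.1 with
  | none =>
    simp only []
    rw [PySem.Dict.get?_insert]
    by_cases hk : p.1 = k
    · subst hk; simp
    · simp [hk, Ne.symm hk]
  | some old =>
    by_cases hv : p.2 < old
    · simp only [if_pos hv]
      rw [PySem.Dict.get?_insert]
      by_cases hk : p.1 = k
      · subst hk; simp
      · simp [hk, Ne.symm hk]
    · by_cases hk : p.1 = k
      · subst hk; simp [hv, h]
      · simp [hk, hv]

lemma pvA_get? : ∀ (l : List (String × Int)) (d : PySem.Dict String Int) (k : String),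
    (l.foldl pvStepA d).get? k =
      ((l.filter (fun p => p.1 == k)).map (fun p => p.2)).foldl pvOMin (d.get? k) := by
  intro l
  induction l with
  | nil => intro d k; simp
  | cons p rest ih =>
    intro d k
    simp only [List.foldl_cons]
    rw [ih]
    by_cases hk : p.1 = k
    · rw [pvStepA_get?]
      simp [hk]
    · rw [pvStepA_get?]
      simp [hk]

lemma pvStepA_keys (d : PySem.Dict String Int) (p : String × Int) :
    (pvStepA d p).keys = PySem.Set.add d.keys p.1 := by
  unfold pvStepA
  cases h : d.get? p.1 with
  | none =>
    have hc : d.contains p.1 = false := by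
      rw [PySem.Dict.contains_eq_isSome_get?, h]; rfl
    have hnm : p.1 ∉ d.keys := fun hm =>
      absurd ((PySem.Dict.contains_iff_mem_keys _ _).2 hm) (by simp [hc])
    simp only []
    rw [PySem.Dict.keys_insert_of_not_contains _ _ hc]
    simp [PySem.Set.add, PySem.Set.contains, hnm]
  | some old =>
    have hc : d.contains p.1 = true := by
      rw [PySem.Dict.contains_eq_isSome_get?, h]; rfl
    have hmem : p.1 ∈ d.keys := (PySem.Dict.contains_iff_mem_keys _ _).1 hc
    have hadd : PySem.Set.add d.keys p.1 = d.keys := by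
      simp [PySem.Set.add, PySem.Set.contains, hmem]
    by_cases hv : p.2 < old
    · simp only [if_pos hv]
      rw [PySem.Dict.keys_insert_of_contains _ _ hc, hadd]
    · simp [hv, hadd]

lemma pvA_keys : ∀ (l : List (String × Int)) (d : PySem.Dict String Int),
    (l.foldl pvStepA d).keys = PySem.Set.update d.keys (l.map (fun p => p.1)) := by
  intro l
  induction l with
  | nil => intro d; simp [PySem.Set.update]
  | cons p rest ih =>
    intro d
    simp only [List.foldl_cons, List.map_cons]
    rw [ih, PySem.Set.update_cons, pvStepA_keys]

lemma pvOMin_min (v w : Int) : (if v < w then v else w) = min w v := by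
  by_cases h : v < w
  · simp [min_def, h]
  · simp [min_def, h]

lemma pvOMin_some : ∀ (t : List Int) (w : Int),
    t.foldl pvOMin (some w) = some (t.foldl min w) := by
  intro t
  induction t with
  | nil => intro w; rfl
  | cons v rest ih =>
    intro w
    simp only [List.foldl_cons]
    rw [show pvOMin (some w) v = some (min w v) from by simp [pvOMin, pvOMin_min], ih]

lemma pv_foldl_im {α β γ : Type} (g : β → α) (f : γ → α → γ) :
    ∀ (l : List β) (init : γ), l.foldl (fun d t => f d (g t)) init = (l.map g).foldl f init := by
  intro l
  induction l with
  | nil => intro init; rfl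
  | cons x xs ih => intro init; simp only [List.foldl_cons, List.map_cons]; rw [ih]

-- A's dict, as items, equals B's dedup-then-reduce pipeline over the flat pair list
lemma pvMain : ∀ (l : List (String × Int)),
    (l.foldl pvStepA PySem.Dict.empty).items =
      (PySem.Set.ofList (l.map Prod.fst)).map (fun k =>
        (k, match (l.filter (fun p => p.1 == k)).map Prod.snd with
            | [] => 0
            | x :: t => t.foldl min x)) := by
  intro l
  set dA := l.foldl pvStepA PySem.Dict.empty with hdA
  have hkA : dA.keys = PySem.Set.ofList (l.map (fun p => p.1)) := by
    rw [hdA, pvA_keys]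
    simp [PySem.Set.update_nil_left]
  have hndA : dA.keys.Nodup := by rw [hkA]; exact PySem.Set.nodup_ofList _
  rw [PySem.Dict.items_eq_map_keys dA hndA 0, hkA]
  apply List.map_congr_left
  intro k hk
  have hkmem : k ∈ l.map (fun p : String × Int => p.1) := (PySem.Set.mem_ofList _ _).1 hk
  have hgne : (l.filter (fun p => p.1 == k)).map (fun p : String × Int => p.2) ≠ [] := by
    intro h
    obtain ⟨p, hp, hpk⟩ := List.mem_map.1 hkmem
    have hpf : p ∈ l.filter (fun p => p.1 == k) := List.mem_filter.2 ⟨hp, by simp [hpk]⟩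
    have hmem2 : p.2 ∈ (l.filter (fun p => p.1 == k)).map (fun p : String × Int => p.2) :=
      List.mem_map_of_mem hpf
    rw [h] at hmem2
    exact absurd hmem2 (List.not_mem_nil)
  obtain ⟨x, t, hxt⟩ := List.exists_cons_of_ne_nil hgne
  have hgA : dA.get? k = some (t.foldl min x) := by
    rw [hdA, pvA_get?]
    rw [show (PySem.Dict.empty : PySem.Dict String Int).get? k = none from rfl]
    rw [hxt]
    simp only [List.foldl_cons]
    rw [show pvOMin none x = some x from rfl, pvOMin_some]
  rw [PySem.Dict.getD_eq_get?_getD, hgA, hxt]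
  rfl

-- ===== VERDICT (by name: the statement is the Claim_ definition above) =====
theorem build_rare_df_map_spec : Claim_equal_build_rare_df_map := by
  intro filter_obj _ _
  unfold Spec_build_rare_df_map build_rare_df_map build_rare_df_map_alt
  rw [pv_foldl_foldl]
  rw [show (fun (d : PySem.Dict String Int) (t : String × Int × Int) =>
        match d.get? t.1 with
        | none => d.insert t.1 t.2.2
        | some old => if t.2.2 < old then d.insert t.1 t.2.2 else d)
      = (fun d t => pvStepA d (t.1, t.2.2)) from rfl]
  rw [pv_foldl_im (fun (t : String × Int × Int) => (t.1, t.2.2)) pvStepA]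
  rw [show ((((PySem.Dict.mk ((PySem.Dict.mk filter_obj).getD "rare" [])).getD "chunks" []).flatMap
      (fun row => ((PySem.Dict.mk row).getD "rare_anchors" []).map (fun t => (t.1, t.2.2))))
    = (((PySem.Dict.mk ((PySem.Dict.mk filter_obj).getD "rare" [])).getD "chunks" []).flatMap
      (fun row => (PySem.Dict.mk row).getD "rare_anchors" [])).map (fun t => (t.1, t.2.2)))
    from by rw [List.map_flatMap]]
  exact pvMain _
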